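-- pv_equiv track=rewrite | github.com/mxmaslin/test-tasks | tweets_sentiment/calculate.py | calculate_tweet_sentiment
-- ===== SOURCE A (Python) =====
-- import string
--
-- def calculate_tweet_sentiment(tweet, sentiment_dict):
--     sentiment = 0
--     translator = str.maketrans('', '', string.punctuation)
--     tweet = tweet.translate(translator).lower().split()
--     for word in tweet:
--         if word in sentiment_dict:
--             sentiment += int(sentiment_dict[word])
--     return sentiment
-- ===== SOURCE B (Python) =====
-- import string
--
-- def calculate_tweet_sentiment(tweet, sentiment_dict):
--     words = tweet.translate(str.maketrans('', '', string.punctuation)).lower().split()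
--     total = 0
--     for word, score in sentiment_dict.items():
--         c = words.count(word)
--         if c:
--             total += c * int(score)
--     return total
-- ===== Notes on version B (the rewrite author's own statement) =====
-- stated objective: alternative
-- what changed: B inverts the traversal: instead of A's scan over every tweet token with a dict lookup per token, B iterates once over the sentiment dictionary's entries and adds words.count(word) * int(score) for each entry that occurs in the cleaned token list.
import Mathlib
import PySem

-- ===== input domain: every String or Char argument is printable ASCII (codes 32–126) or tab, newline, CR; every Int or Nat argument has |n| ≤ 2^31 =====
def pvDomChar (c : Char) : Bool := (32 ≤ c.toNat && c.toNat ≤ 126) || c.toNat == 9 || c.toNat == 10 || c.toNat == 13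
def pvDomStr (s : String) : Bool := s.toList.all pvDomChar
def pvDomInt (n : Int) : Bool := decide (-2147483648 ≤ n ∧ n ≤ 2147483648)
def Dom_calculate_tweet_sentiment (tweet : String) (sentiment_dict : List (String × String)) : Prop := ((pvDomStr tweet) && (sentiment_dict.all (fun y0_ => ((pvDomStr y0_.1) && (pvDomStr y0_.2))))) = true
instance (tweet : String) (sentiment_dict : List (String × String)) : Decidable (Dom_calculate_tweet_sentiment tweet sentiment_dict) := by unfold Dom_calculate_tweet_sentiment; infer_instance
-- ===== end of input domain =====

-- B inverts the traversal: it iterates over the dictionary's entries and counts each key in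
-- the cleaned token list, instead of A's per-token scan with a dict lookup; objective: alternative.

-- shared cleaning pipeline of both Pythons: tweet.translate(str.maketrans('', '', string.punctuation)).lower().split()
-- string.punctuation is the 32 ASCII chars 33–47, 58–64, 91–96, 123–126; translate deletes them (exact by char filter)
def pvIsPunct (c : Char) : Bool :=
  (33 ≤ c.toNat && c.toNat ≤ 47) || (58 ≤ c.toNat && c.toNat ≤ 64) ||
  (91 ≤ c.toNat && c.toNat ≤ 96) || (123 ≤ c.toNat && c.toNat ≤ 126)

def pvCleanWords (tweet : String) : List String :=
  PySem.Str.split₀ (PySem.Str.lower (String.ofList (tweet.toList.filter (fun c => !pvIsPunct c))))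

-- ===== PORT A =====
def calculate_tweet_sentiment (tweet : String) (sentiment_dict : List (String × String)) : Int :=
  let d := PySem.Dict.ofList sentiment_dict
  let tweetWords := pvCleanWords tweet
  tweetWords.foldl (fun sentiment word =>
    if d.contains word then
      -- int(sentiment_dict[word]); Pre_ excludes the ValueError (ofStr? = none) case, so .getD 0 is never taken
      sentiment + (PySem.Int.ofStr? (d.getD word "")).getD 0
    else sentiment) 0

-- ===== PORT B =====
def calculate_tweet_sentiment_alt (tweet : String) (sentiment_dict : List (String × String)) : Int :=
  let words := pvCleanWords tweet
  -- for word, score in sentiment_dict.items(): c = words.count(word); if c: total += c * int(score)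
  (PySem.Dict.ofList sentiment_dict).items.foldl (fun total kv =>
    let c := words.count kv.1
    if c ≠ 0 then total + (c : Int) * (PySem.Int.ofStr? kv.2).getD 0 else total) 0

-- ===== PRECONDITION & SPEC =====
-- Pre_ excludes exactly the inputs where Python A raises ValueError: a cleaned tweet word that is a
-- dict key whose value string is not int()-parseable (B raises there too).
def Pre_calculate_tweet_sentiment (tweet : String) (sentiment_dict : List (String × String)) : Prop :=
  ∀ w ∈ pvCleanWords tweet,
    ((PySem.Dict.ofList sentiment_dict).get? w).all (fun v => (PySem.Int.ofStr? v).isSome) = true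

instance (tweet : String) (sentiment_dict : List (String × String)) : Decidable (Pre_calculate_tweet_sentiment tweet sentiment_dict) := by
  unfold Pre_calculate_tweet_sentiment; infer_instance

def pvWitness_calculate_tweet_sentiment : String × (List (String × String)) :=
  ("Good, good day!", [("good", "+2"), ("bad", "-3")])

def Spec_calculate_tweet_sentiment (tweet : String) (sentiment_dict : List (String × String)) (out : Int) : Prop := out = calculate_tweet_sentiment_alt tweet sentiment_dict
instance (tweet : String) (sentiment_dict : List (String × String)) (out : Int) : Decidable (Spec_calculate_tweet_sentiment tweet sentiment_dict out) := by unfold Spec_calculate_tweet_sentiment; infer_instance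

-- ===== CLAIM (what is proved, stated in full; the proofs are below) =====
def Claim_equal_calculate_tweet_sentiment : Prop := ∀ (tweet : String) (sentiment_dict : List (String × String)), Dom_calculate_tweet_sentiment tweet sentiment_dict → Pre_calculate_tweet_sentiment tweet sentiment_dict → Spec_calculate_tweet_sentiment tweet sentiment_dict (calculate_tweet_sentiment tweet sentiment_dict)

-- ===== LEMMAS AND PROOFS =====

-- Σ_{k ∈ keys} (if k == a then f k else 0) = if a ∈ keys then f a else 0, for Nodup keys
theorem pv_sum_single {α : Type} [BEq α] [LawfulBEq α] (f : α → Int) (a : α) :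
    ∀ (keys : List α), keys.Nodup →
      (keys.map (fun k => if k == a then f k else 0)).sum = if a ∈ keys then f a else 0 := by
  intro keys
  induction keys with
  | nil => simp
  | cons k ks ih =>
    intro hn
    rcases List.nodup_cons.mp hn with ⟨hk, hks⟩
    by_cases h : k = a
    · subst h
      simp [ih hks, hk]
    · have : (k == a) = false := beq_eq_false_iff_ne.mpr h
      simp [this, ih hks, Ne.symm h]

-- Σ over Nodup keys of count·f = Σ over tokens of (if token ∈ keys then f else 0)
theorem pv_count_sum {α : Type} [BEq α] [LawfulBEq α] (keys : List α) (hn : keys.Nodup) (f : α → Int) :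
    ∀ (xs : List α),
      (keys.map (fun k => (xs.count k : Int) * f k)).sum
        = (xs.map (fun w => if w ∈ keys then f w else 0)).sum := by
  intro xs
  induction xs with
  | nil => simp
  | cons a xs ih =>
    have hterm : ∀ k ∈ keys, (((a :: xs).count k : Int)) * f k
        = (xs.count k : Int) * f k + (if k == a then f k else 0) := by
      intro k _
      rw [List.count_cons]
      by_cases h : (k == a) = true
      · have h' := eq_of_beq h
        subst h'
        simp [add_mul]
      · have h' : (a == k) = false := by
          simp only [beq_eq_false_iff_ne]
          intro he
          exact absurd (by simp [he]) h
        simp [h, h']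
    rw [List.map_congr_left hterm, PySem.List.sum_map_add_int, ih,
        pv_sum_single f a keys hn, List.map_cons, List.sum_cons, add_comm]

-- A's loop, abstracted: plain sum of the per-word score over all tokens
theorem pv_A_sum (d : PySem.Dict String String) (xs : List String) :
    xs.foldl (fun sentiment word =>
      if d.contains word then sentiment + (PySem.Int.ofStr? (d.getD word "")).getD 0
      else sentiment) 0
    = (xs.map (fun w => if d.contains w then (PySem.Int.ofStr? (d.getD w "")).getD 0 else 0)).sum := by
  rw [PySem.List.foldl_congr_mem xs _
      (fun acc w => acc + (if d.contains w then (PySem.Int.ofStr? (d.getD w "")).getD 0 else 0)) 0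
      (by intro acc w _; by_cases h : d.contains w = true <;> simp [h])]
  rw [PySem.List.foldl_add, zero_add]

-- B's loop, abstracted: Σ over the dict's entries of count·score
theorem pv_B_sum (d : PySem.Dict String String) (hn : d.keys.Nodup) (xs : List String) :
    d.items.foldl (fun total kv =>
      let c := xs.count kv.1
      if c ≠ 0 then total + (c : Int) * (PySem.Int.ofStr? kv.2).getD 0 else total) 0
    = (d.keys.map (fun k => ((xs.count k : Int)) *
        (PySem.Int.ofStr? (d.getD k "")).getD 0)).sum := by
  rw [PySem.List.foldl_congr_mem _ _
      (fun total kv => total + ((xs.count kv.1 : Int)) * (PySem.Int.ofStr? kv.2).getD 0) 0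
      (by
        intro total kv _
        by_cases h : xs.count kv.1 = 0 <;> simp [h])]
  rw [PySem.List.foldl_add, zero_add, PySem.Dict.items_eq_map_keys d hn "", List.map_map]
  rfl

-- ===== VERDICT (by name: the statement is the Claim_ definition above) =====
theorem calculate_tweet_sentiment_spec : Claim_equal_calculate_tweet_sentiment := by
  intro tweet sentiment_dict _ _
  unfold Spec_calculate_tweet_sentiment calculate_tweet_sentiment calculate_tweet_sentiment_alt
  rw [pv_A_sum, pv_B_sum _ (PySem.Dict.nodup_keys_ofList _),
      pv_count_sum _ (PySem.Dict.nodup_keys_ofList _) _ (pvCleanWords tweet)]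
  apply congrArg List.sum
  apply List.map_congr_left
  intro w _
  rw [PySem.Dict.contains_eq_decide_mem_keys]
  by_cases h : w ∈ (PySem.Dict.ofList sentiment_dict).keys <;> simp [h]
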